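-- pv_equiv track=rewrite | github.com/ferditing/playersphere-backend | app/services/scheduling_service.py | _determine_knockout_rounds
-- ===== SOURCE A (Python) =====
-- def _determine_knockout_rounds(num_teams):
--     """Determine knockout round names based on number of teams"""
--     rounds = []
--
--     # Find the power of 2 that's >= num_teams
--     power_of_2 = 1
--     while power_of_2 < num_teams:
--         power_of_2 *= 2
--
--     # If not a power of 2, we need preliminary rounds to get to power of 2
--     if power_of_2 > num_teams:
--         # Add preliminary rounds
--         if num_teams > 128:
--             rounds.append("Qualifying Round 1")
--             rounds.append("Qualifying Round 2")
--         elif num_teams > 64: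
--             rounds.append("Preliminary Round")
--         elif num_teams > 32:
--             rounds.append("Round of 64")
--         elif num_teams > 16:
--             rounds.append("Round of 32")
--
--     # Now add the standard tournament rounds from power_of_2 down to 2
--     current_round = power_of_2
--     while current_round >= 2:
--         if current_round == 256:
--             rounds.append("Round of 256")
--         elif current_round == 128:
--             rounds.append("Round of 128")
--         elif current_round == 64:
--             rounds.append("Round of 64")
--         elif current_round == 32:
--             rounds.append("Round of 32")
--         elif current_round == 16:
--             rounds.append("Round of 16")
--         elif current_round == 8:
--             rounds.append("Quarter-Finals")
--         elif current_round == 4: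
--             rounds.append("Semi-Finals")
--         elif current_round == 2:
--             rounds.append("Final")
--
--         current_round //= 2
--
--     return rounds
-- ===== SOURCE B (Python) =====
-- # Number of knockout rounds k = ceil(log2(num_teams)); the bracket names are the last k
-- # entries of a fixed full-bracket list, and the preliminary prefix is picked by counting
-- # how many thresholds num_teams clears.  No loops at all.
--
-- _FULL = ["Round of 256", "Round of 128", "Round of 64", "Round of 32",
--          "Round of 16", "Quarter-Finals", "Semi-Finals", "Final"]
--
-- _PRELIMS = [[], ["Round of 32"], ["Round of 64"], ["Preliminary Round"],
--             ["Qualifying Round 1", "Qualifying Round 2"]]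
--
--
-- def _determine_knockout_rounds(num_teams):
--     """Determine knockout round names based on number of teams"""
--     k = 0 if num_teams <= 1 else (num_teams - 1).bit_length()
--     main = _FULL[max(0, 8 - k):]
--     if num_teams == 1 << k:          # perfect bracket: no preliminary rounds
--         return main
--     idx = (num_teams > 16) + (num_teams > 32) + (num_teams > 64) + (num_teams > 128)
--     return _PRELIMS[idx] + main
-- ===== Notes on version B (the rewrite author's own statement) =====
-- stated objective: simpler
-- what changed: B has no loops: the round count k comes from bit_length, the main rounds are a single slice of a fixed full-bracket name list (last k entries), and the preliminary prefix is selected by counting cleared thresholds into a list of prefixes, instead of A's doubling loop, halving loop and two if/elif chains.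
import Mathlib
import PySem

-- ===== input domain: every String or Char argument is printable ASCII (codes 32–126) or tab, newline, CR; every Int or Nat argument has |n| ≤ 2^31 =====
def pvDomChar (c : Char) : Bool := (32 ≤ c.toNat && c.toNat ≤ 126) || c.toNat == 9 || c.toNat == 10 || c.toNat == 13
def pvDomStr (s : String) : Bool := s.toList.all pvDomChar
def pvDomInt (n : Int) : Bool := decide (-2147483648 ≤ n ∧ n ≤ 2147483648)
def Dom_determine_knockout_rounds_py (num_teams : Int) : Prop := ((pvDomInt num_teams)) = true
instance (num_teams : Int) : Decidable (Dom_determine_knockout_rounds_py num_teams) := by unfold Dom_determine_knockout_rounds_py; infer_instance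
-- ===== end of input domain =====

-- B removes all loops: the round count comes from bit_length, the main rounds are one slice
-- of a fixed full-bracket list, and the preliminary prefix is picked by counting cleared
-- thresholds (objective: simpler; same return value).

-- ===== PORT A =====
-- 'while power_of_2 < num_teams: power_of_2 *= 2'.  The fuel argument only makes the
-- recursion structural (a totality guard); it is called with fuel = num_teams.toNat, which
-- always exceeds the number of iterations (doubling from 1 passes num_teams within
-- num_teams steps), so the loop always exits through its own condition, exactly as in Python.
def pvGrowA (fuel : Nat) (num_teams power_of_2 : Int) : Int :=
  match fuel with
  | 0 => power_of_2
  | f + 1 =>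
      if power_of_2 < num_teams then pvGrowA f num_teams (power_of_2 * 2)
      else power_of_2

-- the if/elif chain inside the 'while current_round >= 2' loop
def pvRoundNamesA (current_round : Int) : List String :=
  if current_round = 256 then ["Round of 256"]
  else if current_round = 128 then ["Round of 128"]
  else if current_round = 64 then ["Round of 64"]
  else if current_round = 32 then ["Round of 32"]
  else if current_round = 16 then ["Round of 16"]
  else if current_round = 8 then ["Quarter-Finals"]
  else if current_round = 4 then ["Semi-Finals"]
  else if current_round = 2 then ["Final"]
  else []

-- 'while current_round >= 2: <append name>; current_round //= 2'.  Fuel is again only a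
-- totality guard: called with fuel = power_of_2.toNat ≥ number of halvings, so the loop
-- always exits through 'current_round < 2', exactly as in Python.
def pvDownA (fuel : Nat) (current_round : Int) : List String :=
  match fuel with
  | 0 => []
  | f + 1 =>
      if 2 ≤ current_round then
        pvRoundNamesA current_round ++ pvDownA f (PySem.Int.floordiv current_round 2)
      else []

def determine_knockout_rounds_py (num_teams : Int) : List String :=
  let power_of_2 := pvGrowA num_teams.toNat num_teams 1
  let rounds : List String :=
    if power_of_2 > num_teams then
      if num_teams > 128 then ["Qualifying Round 1", "Qualifying Round 2"]
      else if num_teams > 64 then ["Preliminary Round"]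
      else if num_teams > 32 then ["Round of 64"]
      else if num_teams > 16 then ["Round of 32"]
      else []
    else []
  rounds ++ pvDownA power_of_2.toNat power_of_2

-- ===== PORT B =====
def pvFull : List String :=
  ["Round of 256", "Round of 128", "Round of 64", "Round of 32",
   "Round of 16", "Quarter-Finals", "Semi-Finals", "Final"]

def pvPrelims : List (List String) :=
  [[], ["Round of 32"], ["Round of 64"], ["Preliminary Round"],
   ["Qualifying Round 1", "Qualifying Round 2"]]

def determine_knockout_rounds_py_alt (num_teams : Int) : List String :=
  -- '(num_teams - 1).bit_length()'
  let k : Nat := if num_teams ≤ 1 then 0 else PySem.Int.bitLength (num_teams - 1)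
  -- '_FULL[max(0, 8 - k):]' — Nat subtraction 8 - k is exactly max(0, 8 - k)
  let main := pvFull.drop (8 - k)
  if num_teams = 2 ^ k then main    -- 'num_teams == 1 << k'
  else
    -- 'idx = (num_teams > 16) + (num_teams > 32) + (num_teams > 64) + (num_teams > 128)'
    let idx : Nat := (if num_teams > 16 then 1 else 0) + (if num_teams > 32 then 1 else 0)
      + (if num_teams > 64 then 1 else 0) + (if num_teams > 128 then 1 else 0)
    -- '_PRELIMS[idx]': idx ≤ 4 < len(_PRELIMS), so the index is always in range
    ((PySem.List.pyGet? pvPrelims (idx : Int)).getD []) ++ main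

-- ===== PRECONDITION & SPEC =====
def Spec_determine_knockout_rounds_py (num_teams : Int) (out : List String) : Prop := out = determine_knockout_rounds_py_alt num_teams
instance (num_teams : Int) (out : List String) : Decidable (Spec_determine_knockout_rounds_py num_teams out) := by unfold Spec_determine_knockout_rounds_py; infer_instance

-- ===== CLAIM (what is proved, stated in full; the proofs are below) =====
def Claim_equal_determine_knockout_rounds_py : Prop := ∀ (num_teams : Int), Dom_determine_knockout_rounds_py num_teams → Spec_determine_knockout_rounds_py num_teams (determine_knockout_rounds_py num_teams)

-- ===== LEMMAS AND PROOFS =====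

-- for 2 ≤ n, n ≤ 2 ^ bitLength (n - 1)
theorem pvLePow (n : Int) (_hn : 2 ≤ n) : n ≤ (2 : Int) ^ PySem.Int.bitLength (n - 1) := by
  have hlt := PySem.Int.lt_two_pow_bitLength (n - 1)
  have h2 : n - 1 ≤ ((n - 1).natAbs : Int) := Int.le_natAbs
  have h3 : (((2 : Nat) ^ PySem.Int.bitLength (n - 1) : Nat) : Int)
      = (2 : Int) ^ PySem.Int.bitLength (n - 1) := by push_cast; ring
  have h1 : ((n - 1).natAbs : Int) < (((2 : Nat) ^ PySem.Int.bitLength (n - 1) : Nat) : Int) := by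
    exact_mod_cast hlt
  linarith

-- for 2 ≤ n, bitLength (n - 1) ≤ n (so fuel n.toNat suffices for A's doubling loop)
theorem pvBitLe (n : Int) (hn : 2 ≤ n) : (PySem.Int.bitLength (n - 1) : Int) ≤ n := by
  set b := PySem.Int.bitLength (n - 1) with hb
  have hne : n - 1 ≠ 0 := by omega
  have hlow := PySem.Int.two_pow_bitLength_le (n - 1) hne
  have hself : b - 1 < 2 ^ (b - 1) := Nat.lt_two_pow_self
  have hmid : (2 : Nat) ^ (b - 1) ≤ (n - 1).natAbs := hlow
  have habs : ((n - 1).natAbs : Int) = n - 1 := Int.natAbs_of_nonneg (by omega)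
  have : ((b : Int) - 1) ≤ ((n - 1).natAbs : Int) := by
    have h1 : b - 1 ≤ (n - 1).natAbs := le_trans (Nat.le_of_lt hself) hmid
    omega
  omega

-- A's doubling loop, started at 2^j with fuel ≥ remaining iterations, reaches 2^(bitLength (n-1)).
theorem pvGrowA_pow (n : Int) (hn : 2 ≤ n) :
    ∀ (d j : Nat), PySem.Int.bitLength (n - 1) = j + d →
      ∀ (fuel : Nat), d ≤ fuel →
      pvGrowA fuel n ((2 : Int) ^ j) = 2 ^ PySem.Int.bitLength (n - 1) := by
  intro d
  induction d with
  | zero =>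
      intro j hj fuel _
      have hle : n ≤ (2 : Int) ^ j := by
        have := pvLePow n hn
        rw [show PySem.Int.bitLength (n - 1) = j by omega] at this
        exact this
      cases fuel with
      | zero => rw [pvGrowA, show PySem.Int.bitLength (n - 1) = j by omega]
      | succ f => rw [pvGrowA, if_neg (by omega), show PySem.Int.bitLength (n - 1) = j by omega]
  | succ d ih =>
      intro j hj fuel hfuel
      have hne : n - 1 ≠ 0 := by omega
      have hlow := PySem.Int.two_pow_bitLength_le (n - 1) hne
      have hjlt : (2 : Int) ^ j < n := by
        have h1 : (2 : Nat) ^ j ≤ 2 ^ (PySem.Int.bitLength (n - 1) - 1) :=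
          Nat.pow_le_pow_right (by decide) (by omega)
        have h2 : (((2 : Nat) ^ j : Nat) : Int) ≤ ((n - 1).natAbs : Int) :=
          by exact_mod_cast le_trans h1 hlow
        have h3 : ((n - 1).natAbs : Int) = n - 1 := Int.natAbs_of_nonneg (by omega)
        have h4 : (((2 : Nat) ^ j : Nat) : Int) = (2 : Int) ^ j := by push_cast; ring
        linarith
      obtain ⟨f, rfl⟩ : ∃ f, fuel = f + 1 := ⟨fuel - 1, by omega⟩
      rw [pvGrowA, if_pos hjlt, ← pow_succ]
      exact ih (j + 1) (by omega) f (by omega)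

theorem pvHalfPow (k : Nat) :
    PySem.Int.floordiv ((2 : Int) ^ (k + 1)) 2 = (2 : Int) ^ k := by
  rw [PySem.Int.floordiv_eq_ediv_of_pos (by decide), pow_succ]
  exact Int.mul_ediv_cancel _ (by decide)

-- A's halving loop over 2^k (with enough fuel) produces exactly the last min(k,8) names of pvFull.
theorem pvDownA_eq (k : Nat) :
    ∀ (fuel : Nat), k ≤ fuel → pvDownA fuel ((2 : Int) ^ k) = pvFull.drop (8 - k) := by
  induction k with
  | zero =>
      intro fuel _
      cases fuel with
      | zero => rfl
      | succ f => rw [pvDownA, if_neg (by decide)]; rfl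
  | succ k ih =>
      intro fuel hfuel
      obtain ⟨f, rfl⟩ : ∃ f, fuel = f + 1 := ⟨fuel - 1, by omega⟩
      have hge : (2 : Int) ≤ 2 ^ (k + 1) := by
        calc (2 : Int) = 2 ^ 1 := by decide
        _ ≤ 2 ^ (k + 1) := pow_le_pow_right₀ (by decide) (by omega)
      rw [pvDownA, if_pos hge, pvHalfPow, ih f (by omega)]
      by_cases hk : k ≤ 7
      · interval_cases k <;> norm_num [pvRoundNamesA, pvFull]
      · have h512 : (512 : Int) ≤ 2 ^ (k + 1) := by
          calc (512 : Int) = 2 ^ 9 := by decide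
          _ ≤ 2 ^ (k + 1) := pow_le_pow_right₀ (by decide) (by omega)
        have hnames : pvRoundNamesA ((2 : Int) ^ (k + 1)) = [] := by
          rw [pvRoundNamesA]
          repeat rw [if_neg (by omega)]
        rw [hnames]
        simp [show 8 - k = 0 by omega, show 8 - (k + 1) = 0 by omega]

-- A's power loop (with fuel n.toNat) agrees with B's closed form
theorem pvPow_eq (n : Int) :
    pvGrowA n.toNat n 1 =
      (2 : Int) ^ (if n ≤ 1 then 0 else PySem.Int.bitLength (n - 1)) := by
  by_cases hn : n ≤ 1
  · rw [if_pos hn]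
    cases h : n.toNat with
    | zero => rfl
    | succ f => rw [pvGrowA, if_neg (by omega)]; rfl
  · rw [if_neg hn]
    have hfuel : PySem.Int.bitLength (n - 1) ≤ n.toNat := by
      have := pvBitLe n (by omega)
      omega
    have h1 : (1 : Int) = 2 ^ 0 := by decide
    rw [h1]
    exact pvGrowA_pow n (by omega) (PySem.Int.bitLength (n - 1)) 0 (by omega) n.toNat hfuel

-- A's if/elif preliminary chain equals B's count-indexed prefix lookup
theorem pvPrelim_eq (n : Int) :
    (if n > 128 then ["Qualifying Round 1", "Qualifying Round 2"]
     else if n > 64 then ["Preliminary Round"]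
     else if n > 32 then ["Round of 64"]
     else if n > 16 then ["Round of 32"]
     else []) =
    ((PySem.List.pyGet? pvPrelims
        (((if n > 16 then 1 else 0) + (if n > 32 then 1 else 0)
          + (if n > 64 then 1 else 0) + (if n > 128 then 1 else 0) : Nat) : Int)).getD []) := by
  by_cases h128 : n > 128
  · simp [h128, show n > 64 by omega, show n > 32 by omega, show n > 16 by omega,
      pvPrelims, PySem.List.pyGet?, PySem.List.pyIdx?]
  · by_cases h64 : n > 64
    · simp [h128, h64, show n > 32 by omega, show n > 16 by omega,
        pvPrelims, PySem.List.pyGet?, PySem.List.pyIdx?]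
    · by_cases h32 : n > 32
      · simp [h128, h64, h32, show n > 16 by omega,
          pvPrelims, PySem.List.pyGet?, PySem.List.pyIdx?]
      · by_cases h16 : n > 16
        · simp [h128, h64, h32, h16, pvPrelims, PySem.List.pyGet?, PySem.List.pyIdx?]
        · simp [h128, h64, h32, h16, pvPrelims, PySem.List.pyGet?, PySem.List.pyIdx?]

-- fuel (2^k).toNat suffices for the halving loop
theorem pvDownA_eq' (k : Nat) :
    pvDownA ((2 : Int) ^ k).toNat ((2 : Int) ^ k) = pvFull.drop (8 - k) := by
  apply pvDownA_eq
  have h1 : k < 2 ^ k := Nat.lt_two_pow_self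
  have h2 : ((2 : Int) ^ k).toNat = 2 ^ k := by
    have : (2 : Int) ^ k = ((2 ^ k : Nat) : Int) := by push_cast; ring
    rw [this]
    exact Int.toNat_natCast _
  omega

-- ===== VERDICT (by name: the statement is the Claim_ definition above) =====
theorem determine_knockout_rounds_py_spec : Claim_equal_determine_knockout_rounds_py := by
  intro n _
  show determine_knockout_rounds_py n = determine_knockout_rounds_py_alt n
  simp only [determine_knockout_rounds_py, determine_knockout_rounds_py_alt]
  rw [pvPow_eq, pvDownA_eq']
  set k : Nat := if n ≤ 1 then 0 else PySem.Int.bitLength (n - 1) with hkdef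
  by_cases heq : n = 2 ^ k
  · -- perfect bracket: A's power_of_2 = n, no prelims on either side
    rw [if_pos heq, if_neg (by rw [heq]; exact lt_irrefl _)]
    simp
  · rw [if_neg heq]
    have hlt : n < 2 ^ k := by
      by_cases hn : n ≤ 1
      · rw [hkdef, if_pos hn]
        rw [hkdef, if_pos hn] at heq
        norm_num at heq ⊢
        omega
      · have := pvLePow n (by omega)
        rw [hkdef, if_neg hn]
        rw [hkdef, if_neg hn] at heq
        omega
    rw [if_pos (by omega), pvPrelim_eq]
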